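-- pv_equiv track=rewrite | github.com/pypi-data/pypi-mirror-398 | packages/mbake/mbake-1.4.4.tar.gz/mbake-1.4.4/mbake/core/rules/tabs.py | _is_nested_conditional
-- ===== SOURCE A (Python) =====
-- def _is_nested_conditional(
--     line_index: int, lines: list[str], stripped: str
-- ) -> bool:
--     """Check if this conditional directive is nested inside another conditional block."""
--     if line_index == 0:
--         return False
--
--     # Track conditional nesting depth
--     conditional_depth = 0
--
--     # Look backwards to see if we're inside a conditional block
--     for i in range(line_index - 1, -1, -1):
--         prev_line = lines[i]
--         prev_stripped = prev_line.strip()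
--
--         # Skip empty lines and comments
--         if not prev_stripped or prev_stripped.startswith("#"):
--             continue
--
--         # Check for conditional directives
--         if prev_stripped.startswith("endif"):
--             conditional_depth += 1
--         elif prev_stripped.startswith(("ifeq", "ifneq", "ifdef", "ifndef")):
--             conditional_depth -= 1
--
--             # If we've reached depth 0, we found the matching opening conditional
--             if conditional_depth < 0:
--                 # We are inside a conditional block, so this could be nested
--                 # But only preserve indentation for conditionals inside else blocks
--                 # or for nested conditionals that have meaningful indentation
--                 return True
--
--     return False
-- ===== SOURCE B (Python) =====
-- def _is_nested_conditional(
--     line_index: int, lines: list[str], stripped: str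
-- ) -> bool:
--     """Forward scan of the lines before line_index, keeping a clamped nesting depth."""
--     depth = 0
--     for i, line in enumerate(lines):
--         if i >= line_index:
--             break
--         s = line.strip()
--         if not s or s.startswith("#"):
--             continue
--         if s.startswith("endif"):
--             if depth > 0:
--                 depth -= 1
--         elif s.startswith(("ifeq", "ifneq", "ifdef", "ifndef")):
--             depth += 1
--     return depth > 0
-- ===== Notes on version B (the rewrite author's own statement) =====
-- stated objective: alternative
-- what changed: Replaces A's backward scan from line_index-1 with an early return on the first unmatched opener by a forward scan over the prefix that keeps a clamped (never negative) nesting depth and tests depth > 0 at the end; B is also total where A raises IndexError.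
-- crash fix: A raises IndexError whenever line_index > len(lines) (the loop indexes lines[line_index-1]); B simply scans the whole list there and returns whether the clamped depth is positive. — e.g. on _is_nested_conditional(1, ([], "ifeq (a,b)")): A raises IndexError, B returns false
import Mathlib
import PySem

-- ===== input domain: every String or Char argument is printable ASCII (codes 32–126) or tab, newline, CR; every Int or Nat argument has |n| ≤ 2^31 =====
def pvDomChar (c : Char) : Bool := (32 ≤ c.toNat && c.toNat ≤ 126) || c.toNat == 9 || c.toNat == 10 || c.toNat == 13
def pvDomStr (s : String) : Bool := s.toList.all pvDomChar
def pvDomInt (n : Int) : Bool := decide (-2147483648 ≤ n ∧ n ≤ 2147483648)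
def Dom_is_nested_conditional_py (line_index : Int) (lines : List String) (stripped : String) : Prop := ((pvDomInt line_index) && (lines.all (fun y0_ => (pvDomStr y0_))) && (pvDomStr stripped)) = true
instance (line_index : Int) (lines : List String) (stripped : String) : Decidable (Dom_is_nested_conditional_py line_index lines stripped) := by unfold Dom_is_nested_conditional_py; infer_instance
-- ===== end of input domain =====

-- B replaces A's backward scan with an early return by a forward scan keeping a
-- clamped nesting depth (never negative); same result, B is total where A raises.

-- ===== PORT A =====
-- the backward loop 'for i in range(line_index-1, -1, -1)' with early return on an
-- unmatched opener; indexing lines[i] via pyGetD (Pre_ guarantees i is in range)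
def pvALoop (lines : List String) (idxs : List Int) (depth : Int) : Bool :=
  match idxs with
  | [] => false
  | i :: rest =>
    let prev_stripped := PySem.Str.strip (PySem.List.pyGetD lines i "")
    if prev_stripped = "" || PySem.Str.startswith prev_stripped "#" then
      pvALoop lines rest depth
    else if PySem.Str.startswith prev_stripped "endif" then
      pvALoop lines rest (depth + 1)
    else if PySem.Str.startswith prev_stripped "ifeq" || PySem.Str.startswith prev_stripped "ifneq" ||
            PySem.Str.startswith prev_stripped "ifdef" || PySem.Str.startswith prev_stripped "ifndef" then
      if depth - 1 < 0 then true else pvALoop lines rest (depth - 1)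
    else
      pvALoop lines rest depth

def is_nested_conditional_py (line_index : Int) (lines : List String) (stripped : String) : Bool :=
  if line_index = 0 then false
  else pvALoop lines (PySem.List.pyRange (line_index - 1) (-1) (-1)) 0

-- ===== PORT B =====
-- 'for i, line in enumerate(lines)' with 'if i >= line_index: break' and a clamped depth
def pvBLoop (line_index : Int) (items : List (Int × String)) (depth : Int) : Int :=
  match items with
  | [] => depth
  | (i, line) :: rest =>
    if line_index ≤ i then depth
    else
      let s := PySem.Str.strip line
      if s = "" || PySem.Str.startswith s "#" then
        pvBLoop line_index rest depth
      else if PySem.Str.startswith s "endif" then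
        pvBLoop line_index rest (if 0 < depth then depth - 1 else depth)
      else if PySem.Str.startswith s "ifeq" || PySem.Str.startswith s "ifneq" ||
              PySem.Str.startswith s "ifdef" || PySem.Str.startswith s "ifndef" then
        pvBLoop line_index rest (depth + 1)
      else
        pvBLoop line_index rest depth

def is_nested_conditional_py_alt (line_index : Int) (lines : List String) (stripped : String) : Bool :=
  decide (0 < pvBLoop line_index (PySem.List.enumerate lines 0) 0)

-- ===== PRECONDITION & SPEC =====
-- Pre_ excludes exactly the inputs where A raises IndexError (line_index > len(lines)); A returns on all of Pre_.
def Pre_is_nested_conditional_py (line_index : Int) (lines : List String) (stripped : String) : Prop :=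
  line_index ≤ (lines.length : Int)
instance (line_index : Int) (lines : List String) (stripped : String) : Decidable (Pre_is_nested_conditional_py line_index lines stripped) := by unfold Pre_is_nested_conditional_py; infer_instance

def pvWitness_is_nested_conditional_py : Int × List String × String := (1, (["ifeq (a,b)"], "ifeq (c,d)"))

-- A raises IndexError exactly when line_index > len(lines); B returns the depth of the whole line list there.
def Raises_is_nested_conditional_py (line_index : Int) (lines : List String) (stripped : String) : Prop :=
  (lines.length : Int) < line_index
instance (line_index : Int) (lines : List String) (stripped : String) : Decidable (Raises_is_nested_conditional_py line_index lines stripped) := by unfold Raises_is_nested_conditional_py; infer_instance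
def pvRaiseWitness_is_nested_conditional_py : Int × List String × String := (1, ([], "ifeq (a,b)"))
def pvRaiseWitnessOut_is_nested_conditional_py : Bool := false

def Spec_is_nested_conditional_py (line_index : Int) (lines : List String) (stripped : String) (out : Bool) : Prop := out = is_nested_conditional_py_alt line_index lines stripped
instance (line_index : Int) (lines : List String) (stripped : String) (out : Bool) : Decidable (Spec_is_nested_conditional_py line_index lines stripped out) := by unfold Spec_is_nested_conditional_py; infer_instance

-- ===== CLAIM (what is proved, stated in full; the proofs are below) =====
def Claim_equal_is_nested_conditional_py : Prop := ∀ (line_index : Int) (lines : List String) (stripped : String), Dom_is_nested_conditional_py line_index lines stripped → Pre_is_nested_conditional_py line_index lines stripped → Spec_is_nested_conditional_py line_index lines stripped (is_nested_conditional_py line_index lines stripped)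

def Claim_raises_is_nested_conditional_py : Prop := (∀ (line_index : Int) (lines : List String) (stripped : String), Dom_is_nested_conditional_py line_index lines stripped → Raises_is_nested_conditional_py line_index lines stripped → ¬ Pre_is_nested_conditional_py line_index lines stripped) ∧ (Dom_is_nested_conditional_py (pvRaiseWitness_is_nested_conditional_py.1) (pvRaiseWitness_is_nested_conditional_py.2.1) (pvRaiseWitness_is_nested_conditional_py.2.2) ∧ Raises_is_nested_conditional_py (pvRaiseWitness_is_nested_conditional_py.1) (pvRaiseWitness_is_nested_conditional_py.2.1) (pvRaiseWitness_is_nested_conditional_py.2.2) ∧ is_nested_conditional_py_alt (pvRaiseWitness_is_nested_conditional_py.1) (pvRaiseWitness_is_nested_conditional_py.2.1) (pvRaiseWitness_is_nested_conditional_py.2.2) = pvRaiseWitnessOut_is_nested_conditional_py)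

-- ===== LEMMAS AND PROOFS =====

-- token classification of one line, in A's testing order
inductive PvTok where
  | opn : PvTok
  | cls : PvTok
  | skip : PvTok
deriving DecidableEq, Repr

def pvTok (line : String) : PvTok :=
  let s := PySem.Str.strip line
  if s = "" || PySem.Str.startswith s "#" then .skip
  else if PySem.Str.startswith s "endif" then .cls
  else if PySem.Str.startswith s "ifeq" || PySem.Str.startswith s "ifneq" ||
          PySem.Str.startswith s "ifdef" || PySem.Str.startswith s "ifndef" then .opn
  else .skip

-- A's loop on the token level
def pvARun (ts : List PvTok) (d : Int) : Bool :=
  match ts with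
  | [] => false
  | .skip :: r => pvARun r d
  | .cls :: r => pvARun r (d + 1)
  | .opn :: r => if d - 1 < 0 then true else pvARun r (d - 1)

-- B's loop on the token level
def pvBRun (ts : List PvTok) (d : Int) : Int :=
  match ts with
  | [] => d
  | .skip :: r => pvBRun r d
  | .cls :: r => pvBRun r (if 0 < d then d - 1 else d)
  | .opn :: r => pvBRun r (d + 1)

theorem pvALoop_eq_pvARun (lines : List String) (idxs : List Int) (d : Int) :
    pvALoop lines idxs d = pvARun (idxs.map (fun i => pvTok (PySem.List.pyGetD lines i ""))) d := by
  induction idxs generalizing d with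
  | nil => simp [pvALoop, pvARun]
  | cons i rest ih =>
    simp only [pvALoop, List.map_cons]
    by_cases h1 : (decide (PySem.Str.strip (PySem.List.pyGetD lines i "") = "") ||
        PySem.Str.startswith (PySem.Str.strip (PySem.List.pyGetD lines i "")) "#") = true
    · have ht : pvTok (PySem.List.pyGetD lines i "") = PvTok.skip := by
        simp only [pvTok]; rw [if_pos h1]
      rw [if_pos h1, ht]
      simp only [pvARun]
      exact ih d
    · by_cases h2 : PySem.Str.startswith (PySem.Str.strip (PySem.List.pyGetD lines i "")) "endif" = true
      · have ht : pvTok (PySem.List.pyGetD lines i "") = PvTok.cls := by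
          simp only [pvTok]; rw [if_neg h1, if_pos h2]
        rw [if_neg h1, ht, if_pos h2]
        simp only [pvARun]
        exact ih (d + 1)
      · by_cases h3 : (PySem.Str.startswith (PySem.Str.strip (PySem.List.pyGetD lines i "")) "ifeq" ||
            PySem.Str.startswith (PySem.Str.strip (PySem.List.pyGetD lines i "")) "ifneq" ||
            PySem.Str.startswith (PySem.Str.strip (PySem.List.pyGetD lines i "")) "ifdef" ||
            PySem.Str.startswith (PySem.Str.strip (PySem.List.pyGetD lines i "")) "ifndef") = true
        · have ht : pvTok (PySem.List.pyGetD lines i "") = PvTok.opn := by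
            simp only [pvTok]; rw [if_neg h1, if_neg h2, if_pos h3]
          rw [if_neg h1, ht, if_neg h2, if_pos h3]
          simp only [pvARun]
          by_cases hd : d - 1 < 0
          · rw [if_pos hd, if_pos hd]
          · rw [if_neg hd, if_neg hd]
            exact ih (d - 1)
        · have ht : pvTok (PySem.List.pyGetD lines i "") = PvTok.skip := by
            simp only [pvTok]; rw [if_neg h1, if_neg h2, if_neg h3]
          rw [if_neg h1, ht, if_neg h2, if_neg h3]
          simp only [pvARun]
          exact ih d

theorem pvBLoop_eq_pvBRun (li : Int) (lines : List String) (j d : Int) (hj : 0 ≤ j) :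
    pvBLoop li (PySem.List.enumerate lines j) d = pvBRun ((lines.take (li - j).toNat).map pvTok) d := by
  induction lines generalizing j d with
  | nil => simp [PySem.List.enumerate_nil, pvBLoop, pvBRun]
  | cons x rest ih =>
    rw [PySem.List.enumerate_cons]
    simp only [pvBLoop]
    by_cases hcut : li ≤ j
    · have h0 : (li - j).toNat = 0 := by omega
      rw [if_pos hcut, h0]
      simp [pvBRun]
    · have htk : (li - j).toNat = (li - (j + 1)).toNat + 1 := by omega
      rw [if_neg hcut, htk, List.take_succ_cons, List.map_cons]
      by_cases h1 : (decide (PySem.Str.strip x = "") || PySem.Str.startswith (PySem.Str.strip x) "#") = true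
      · have ht : pvTok x = PvTok.skip := by simp only [pvTok]; rw [if_pos h1]
        rw [if_pos h1, ht]
        simp only [pvBRun]
        exact ih (j + 1) d (by omega)
      · by_cases h2 : PySem.Str.startswith (PySem.Str.strip x) "endif" = true
        · have ht : pvTok x = PvTok.cls := by simp only [pvTok]; rw [if_neg h1, if_pos h2]
          rw [if_neg h1, ht, if_pos h2]
          simp only [pvBRun]
          exact ih (j + 1) _ (by omega)
        · by_cases h3 : (PySem.Str.startswith (PySem.Str.strip x) "ifeq" ||
              PySem.Str.startswith (PySem.Str.strip x) "ifneq" ||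
              PySem.Str.startswith (PySem.Str.strip x) "ifdef" ||
              PySem.Str.startswith (PySem.Str.strip x) "ifndef") = true
          · have ht : pvTok x = PvTok.opn := by
              simp only [pvTok]; rw [if_neg h1, if_neg h2, if_pos h3]
            rw [if_neg h1, ht, if_neg h2, if_pos h3]
            simp only [pvBRun]
            exact ih (j + 1) _ (by omega)
          · have ht : pvTok x = PvTok.skip := by
              simp only [pvTok]; rw [if_neg h1, if_neg h2, if_neg h3]
            rw [if_neg h1, ht, if_neg h2, if_neg h3]
            simp only [pvBRun]
            exact ih (j + 1) d (by omega)

theorem pvBRun_append (M N : List PvTok) (d : Int) :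
    pvBRun (M ++ N) d = pvBRun N (pvBRun M d) := by
  induction M generalizing d with
  | nil => simp [pvBRun]
  | cons t r ih => cases t <;> simp [pvBRun, ih]

theorem pvBRun_nonneg (M : List PvTok) (d : Int) (hd : 0 ≤ d) : 0 ≤ pvBRun M d := by
  induction M generalizing d with
  | nil => simpa [pvBRun]
  | cons t r ih =>
    cases t with
    | skip => exact ih d hd
    | opn => exact ih _ (by omega)
    | cls => exact ih _ (by split_ifs <;> omega)

-- core correspondence: A's backward scan with early return equals B's forward clamped count
theorem pvARun_rev (R : List PvTok) (d : Int) (hd : 0 ≤ d) :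
    pvARun R d = decide (d < pvBRun R.reverse 0) := by
  induction R generalizing d with
  | nil =>
    have h : ¬ d < 0 := by omega
    simp [pvARun, pvBRun, h]
  | cons t r ih =>
    have hm : 0 ≤ pvBRun r.reverse 0 := pvBRun_nonneg _ 0 le_rfl
    cases t with
    | skip =>
      rw [show (PvTok.skip :: r).reverse = r.reverse ++ [PvTok.skip] by simp, pvBRun_append]
      simp only [pvARun, pvBRun]
      exact ih d hd
    | cls =>
      rw [show (PvTok.cls :: r).reverse = r.reverse ++ [PvTok.cls] by simp, pvBRun_append]
      simp only [pvARun, pvBRun]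
      rw [ih (d + 1) (by omega)]
      simp only [decide_eq_decide]
      split_ifs with h <;> omega
    | opn =>
      rw [show (PvTok.opn :: r).reverse = r.reverse ++ [PvTok.opn] by simp, pvBRun_append]
      simp only [pvARun, pvBRun]
      by_cases h0 : d - 1 < 0
      · rw [if_pos h0]
        have hlt : d < pvBRun r.reverse 0 + 1 := by omega
        simp [hlt]
      · rw [if_neg h0, ih (d - 1) (by omega)]
        simp only [decide_eq_decide]
        omega

-- the backward index list reads exactly the prefix lines[0:n]
theorem pvIdx_map (lines : List String) (n : Nat) (hn : n ≤ lines.length) :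
    (PySem.List.pyRange 0 (n : Int) 1).map (fun i => PySem.List.pyGetD lines i "") = lines.take n := by
  induction n with
  | zero => simp [PySem.List.pyRange_one_eq_nil]
  | succ m ih =>
    have h1 : ((m : Int) + 1) = ((m + 1 : Nat) : Int) := by push_cast; ring
    rw [← h1, PySem.List.pyRange_one_succ_right (by positivity)]
    rw [List.map_append, ih (by omega)]
    have hget : PySem.List.pyGetD lines (m : Int) "" = lines[m]'(by omega) := by
      rw [PySem.List.pyGetD_natCast]
      simp [List.getD, List.getElem?_eq_getElem (by omega : m < lines.length)]
    have htake : lines.take (m + 1) = lines.take m ++ [lines[m]'(by omega)] :=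
      List.take_succ_eq_append_getElem (by omega)
    rw [htake, List.map_cons, List.map_nil, hget]

-- ===== VERDICT (by name: the statement is the Claim_ definition above) =====
theorem is_nested_conditional_py_spec : Claim_equal_is_nested_conditional_py := by
  intro li lines stripped _hdom hpre
  unfold Spec_is_nested_conditional_py is_nested_conditional_py is_nested_conditional_py_alt
  rw [pvBLoop_eq_pvBRun li lines 0 0 le_rfl]
  rw [show li - 0 = li by ring]
  by_cases h0 : li = 0
  · subst h0
    rw [if_pos rfl]
    rw [show (0 : Int).toNat = 0 from rfl, List.take_zero, List.map_nil]
    simp [pvBRun]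
  · rw [if_neg h0]
    by_cases hneg : li < 0
    · rw [PySem.List.pyRange_neg_one_eq_nil (by omega)]
      rw [show li.toNat = 0 by omega]
      simp [pvALoop, pvBRun]
    · have hpos : 1 ≤ li := by omega
      rw [pvALoop_eq_pvARun, PySem.List.pyRange_neg_one_eq_reverse]
      rw [show (-1 : Int) + 1 = 0 by norm_num, show li - 1 + 1 = li by ring]
      rw [List.map_reverse]
      rw [show (fun i => pvTok (PySem.List.pyGetD lines i "")) =
            pvTok ∘ (fun i => PySem.List.pyGetD lines i "") from rfl, ← List.map_map]
      have hlen : li.toNat ≤ lines.length := by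
        unfold Pre_is_nested_conditional_py at hpre; omega
      conv_lhs => rw [show li = ((li.toNat : Nat) : Int) by omega]
      rw [pvIdx_map lines li.toNat hlen]
      rw [pvARun_rev _ 0 le_rfl, List.reverse_reverse]

@[simp]
theorem is_nested_conditional_py_raises : Claim_raises_is_nested_conditional_py := by
  unfold Claim_raises_is_nested_conditional_py
  constructor
  · intro li lines stripped _ hr
    unfold Raises_is_nested_conditional_py at hr
    unfold Pre_is_nested_conditional_py
    omega
  · exact ⟨by decide, by decide, by decide⟩
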